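-- pv_equiv track=rewrite | github.com/theorem46/Yang-Mills-Mass-Gap | 1-Core Validation/exp_core_validation_30_solved_state_decomposition_existence_v2.py | generate_G12
-- ===== SOURCE A (Python) =====
-- def generate_G12(iters):
--     seq = [0]
--     for _ in range(iters):
--         out = []
--         for s in seq:
--             if s == 0:
--                 out += [1, 2]
--             elif s == 1:
--                 out += [2, 0]
--             else:
--                 out += [0, 1]
--         seq = out
--     return seq
-- ===== SOURCE B (Python) =====
-- def generate_G12(iters):
--     # Closed form: the i-th element of the expanded sequence is (iters + popcount(i)) % 3.
--     if iters < 0: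
--         return [0]
--     return [(iters + i.bit_count()) % 3 for i in range(2 ** iters)]
-- ===== Notes on version B (the rewrite author's own statement) =====
-- stated objective: alternative
-- what changed: Replaces the iterative morphism rewriting (repeatedly expanding the whole sequence symbol by symbol) with a closed-form per-index computation: element i of the result is (iters + popcount(i)) % 3, produced by a single comprehension over range(2**iters).
import Mathlib
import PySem

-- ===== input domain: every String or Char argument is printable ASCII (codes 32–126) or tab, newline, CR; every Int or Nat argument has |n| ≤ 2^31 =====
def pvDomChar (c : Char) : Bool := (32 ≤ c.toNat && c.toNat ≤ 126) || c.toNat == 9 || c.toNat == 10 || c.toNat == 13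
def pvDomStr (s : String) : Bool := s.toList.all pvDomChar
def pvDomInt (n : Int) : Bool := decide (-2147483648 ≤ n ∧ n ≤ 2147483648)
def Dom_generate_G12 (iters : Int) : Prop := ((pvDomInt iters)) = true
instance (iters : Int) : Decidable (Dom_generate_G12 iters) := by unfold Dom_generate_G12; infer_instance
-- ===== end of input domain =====

-- B replaces A's iterative sequence rewriting by the closed form "element i is (iters + popcount i) % 3" (alternative decomposition, same asymptotic cost).

-- ===== PORT A =====
def generate_G12 (iters : Int) : List Int :=
  (PySem.List.pyRange 0 iters 1).foldl
    (fun seq _ =>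
      seq.foldl (fun out s =>
        out ++ (if s = 0 then ([1, 2] : List Int) else if s = 1 then [2, 0] else [0, 1])) [])
    [0]

-- ===== PORT B =====
-- '2 ** iters' is only reached under the guard 0 ≤ iters, so the Nat exponent iters.toNat is exact.
def generate_G12_alt (iters : Int) : List Int :=
  if iters < 0 then [0]
  else
    (PySem.List.pyRange 0 ((2 : Int) ^ iters.toNat) 1).map
      (fun i => PySem.Int.mod (iters + (PySem.Int.bitCount i : Int)) 3)

-- ===== PRECONDITION & SPEC =====
def Spec_generate_G12 (iters : Int) (out : List Int) : Prop := out = generate_G12_alt iters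
instance (iters : Int) (out : List Int) : Decidable (Spec_generate_G12 iters out) := by unfold Spec_generate_G12; infer_instance

-- ===== CLAIM (what is proved, stated in full; the proofs are below) =====
def Claim_equal_generate_G12 : Prop := ∀ (iters : Int), Dom_generate_G12 iters → Spec_generate_G12 iters (generate_G12 iters)

-- ===== LEMMAS AND PROOFS =====

-- the per-symbol expansion rule of A, applied to a value of the form m % 3
theorem g12_rule_emod (m : Int) :
    (if m % 3 = 0 then ([1, 2] : List Int) else if m % 3 = 1 then [2, 0] else [0, 1])
      = [(m + 1) % 3, (m + 2) % 3] := by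
  have h : m % 3 = 0 ∨ m % 3 = 1 ∨ m % 3 = 2 := by omega
  rcases h with h | h | h <;> simp [h] <;> omega

theorem g12_bc_two_mul (i : Nat) :
    PySem.Int.bitCount ((2 * i : Nat) : Int) = PySem.Int.bitCount (i : Int) := by
  rcases Nat.eq_zero_or_pos i with h | h
  · simp [h]
  · rw [PySem.Int.bitCount_natCast]
    · simp [Nat.mul_div_cancel_left i (by omega : 0 < 2), Nat.mul_mod_right]
    · omega

theorem g12_bc_two_mul_add_one (i : Nat) :
    PySem.Int.bitCount ((2 * i + 1 : Nat) : Int) = PySem.Int.bitCount (i : Int) + 1 := by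
  rw [PySem.Int.bitCount_natCast (h := by omega)]
  have h2 : (2 * i + 1) / 2 = i := by omega
  have h1 : (2 * i + 1) % 2 = 1 := by omega
  rw [h1, h2]; omega

theorem g12_range_two_mul (m : Nat) :
    List.range (2 * m) = (List.range m).flatMap (fun i => [2 * i, 2 * i + 1]) := by
  induction m with
  | zero => simp
  | succ m ih =>
    have h : 2 * (m + 1) = (2 * m + 1) + 1 := by ring
    rw [h, List.range_succ, List.range_succ, List.range_succ, ih,
      List.flatMap_append]
    simp

-- A's value after n rewriting steps, in closed form
theorem g12_closed (n : Nat) :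
    (PySem.List.pyRange 0 (n : Int) 1).foldl
      (fun seq _ =>
        seq.foldl (fun out s =>
          out ++ (if s = 0 then ([1, 2] : List Int) else if s = 1 then [2, 0] else [0, 1])) [])
      [0]
    = (List.range (2 ^ n)).map
        (fun i : Nat => ((n : Int) + (PySem.Int.bitCount (i : Int) : Int)) % 3) := by
  induction n with
  | zero => decide
  | succ n ih =>
    have hc : ((n + 1 : Nat) : Int) = (n : Int) + 1 := by push_cast; ring
    rw [hc, PySem.List.pyRange_one_succ_right (by positivity), List.foldl_append, ih]
    simp only [List.foldl_cons, List.foldl_nil]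
    rw [PySem.List.foldl_append_eq_flatMap, List.nil_append, List.flatMap_map]
    rw [pow_succ, mul_comm (2 ^ n) 2, g12_range_two_mul, List.map_flatMap]
    apply List.flatMap_congr
    intro i _
    simp only [g12_rule_emod ((n : Int) + (PySem.Int.bitCount (i : Int) : Int)),
      List.map_cons, List.map_nil, g12_bc_two_mul, g12_bc_two_mul_add_one, List.cons.injEq]
    refine ⟨?_, ?_⟩
    · have e1 : ((n : Int) + ↑(PySem.Int.bitCount (i : Int)) + 1)
          = ((n : Int) + 1 + ↑(PySem.Int.bitCount (i : Int))) := by ring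
      rw [e1]
    · have e2 : ((n : Int) + ↑(PySem.Int.bitCount (i : Int)) + 2)
          = ((n : Int) + 1 + ↑(PySem.Int.bitCount (i : Int) + 1)) := by push_cast; ring
      exact ⟨by rw [e2], trivial⟩

-- ===== VERDICT (by name: the statement is the Claim_ definition above) =====
theorem generate_G12_spec : Claim_equal_generate_G12 := by
  intro iters _
  unfold Spec_generate_G12 generate_G12 generate_G12_alt
  by_cases h : iters < 0
  · rw [PySem.List.pyRange_one_eq_nil (by omega : iters ≤ 0)]
    simp [h]
  · obtain ⟨n, rfl⟩ : ∃ n : Nat, iters = (n : Int) :=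
      ⟨iters.toNat, (Int.toNat_of_nonneg (by omega)).symm⟩
    rw [if_neg h, g12_closed, Int.toNat_natCast]
    have hp : ((2 : Int) ^ n) = ((2 ^ n : Nat) : Int) := by push_cast; ring
    rw [hp, PySem.List.pyRange_zero_natCast, List.map_map]
    apply List.map_congr_left
    intro i _
    simp only [Function.comp]
    rw [PySem.Int.mod_eq_emod_of_pos (by norm_num : (0:Int) < 3)]
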